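-- pv_equiv track=rewrite | github.com/h0912w/SaaS_Word_Extractor | src/three_step_review.py | _determine_reject_label
-- ===== SOURCE A (Python) =====
-- from typing import Dict, List, Any, Tuple
--
-- def _determine_reject_label(record: Dict[str, Any]) -> str:
--     """Determine the reason for rejection"""
--     word = record['normalized_word'].lower()
--
--     if any(x in word for x in ['fuck', 'shit', 'damn', 'ass']):
--         return 'profanity'
--
--     if len(word) > 15:
--         return 'too_long'
--
--     if len(word) < 3:
--         return 'too_short'
--
--     if any(c.isdigit() for c in word):
--         return 'contains_digits'
--
--     if '-' in word or '_' in word: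
--         return 'contains_special_chars'
--
--     if word.lower() in ['the', 'and', 'or', 'but', 'for', 'with', 'from']:
--         return 'too_generic'
--
--     return 'not_saas_appropriate'
-- ===== SOURCE B (Python) =====
-- # B: one recursive pass over the suffixes of the word accumulating
-- # (length, has_digit, has_special, profane), then one final decision.
-- _PROFANITY = ('fuck', 'shit', 'damn', 'ass')
-- _GENERIC = ('the', 'and', 'or', 'but', 'for', 'with', 'from')
--
-- def _scan(t):
--     """Return (len, has_digit, has_special, profane) for string t, recursively."""
--     if not t:
--         return (0, False, False, False)
--     n, d, s, p = _scan(t[1:])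
--     c = t[0]
--     return (n + 1,
--             d or c.isdigit(),
--             s or c == '-' or c == '_',
--             p or t.startswith(_PROFANITY))
--
-- def _determine_reject_label(record):
--     w = record['normalized_word'].lower()
--     n, digit, special, profane = _scan(w)
--     if profane:
--         return 'profanity'
--     if n > 15:
--         return 'too_long'
--     if n < 3:
--         return 'too_short'
--     if digit:
--         return 'contains_digits'
--     if special:
--         return 'contains_special_chars'
--     if w in _GENERIC:
--         return 'too_generic'
--     return 'not_saas_appropriate'
-- ===== Notes on version B (the rewrite author's own statement) =====
-- stated objective: alternative
-- what changed: Replaces A's six independent library scans of the word (substring tests, len, any(isdigit), membership) by a single recursive pass over the word's suffixes that accumulates (length, has_digit, has_special, profane) — profanity via startswith on each suffix instead of substring 'in' — followed by one final decision; B also drops A's redundant second .lower() in the generic-word test.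
import Mathlib
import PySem

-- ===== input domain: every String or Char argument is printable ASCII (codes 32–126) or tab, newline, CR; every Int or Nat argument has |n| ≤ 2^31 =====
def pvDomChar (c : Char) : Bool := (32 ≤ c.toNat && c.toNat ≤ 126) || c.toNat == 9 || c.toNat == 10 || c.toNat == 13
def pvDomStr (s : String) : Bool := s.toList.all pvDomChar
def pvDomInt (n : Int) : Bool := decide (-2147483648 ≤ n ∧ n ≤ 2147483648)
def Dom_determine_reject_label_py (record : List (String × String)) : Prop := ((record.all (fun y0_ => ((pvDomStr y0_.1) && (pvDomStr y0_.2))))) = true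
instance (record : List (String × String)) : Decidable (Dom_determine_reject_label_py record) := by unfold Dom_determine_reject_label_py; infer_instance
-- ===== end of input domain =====

-- B replaces A's six independent library scans of the word by one recursive pass over
-- the word's suffixes accumulating (length, has_digit, has_special, profane), then one
-- final decision from the accumulated state (same priority order).

-- ===== PORT A =====
def determine_reject_label_py (record : List (String × String)) : String :=
  let word := PySem.Str.lower ((PySem.Dict.mk record).getD "normalized_word" "")
  if ["fuck", "shit", "damn", "ass"].any (fun x => PySem.Str.isIn x word) then "profanity"
  else if 15 < PySem.Str.len word then "too_long"
  else if PySem.Str.len word < 3 then "too_short"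
  else if word.toList.any PySem.Chars.isdigit then "contains_digits"
  else if PySem.Str.isIn "-" word || PySem.Str.isIn "_" word then "contains_special_chars"
  else if ["the", "and", "or", "but", "for", "with", "from"].contains (PySem.Str.lower word) then "too_generic"
  else "not_saas_appropriate"

-- ===== PORT B =====
def pvProfanity : List String := ["fuck", "shit", "damn", "ass"]
def pvGeneric : List String := ["the", "and", "or", "but", "for", "with", "from"]

-- _scan(t): recursive pass over the suffixes of t; 't.startswith(_PROFANITY)' (tuple
-- argument) is 'some profanity word is a prefix of t'; 'c.isdigit()' is Chars.isdigit.
def pvScan : List Char → Int × Bool × Bool × Bool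
  | [] => (0, false, false, false)
  | c :: t =>
    let r := pvScan t
    (r.1 + 1,
     r.2.1 || PySem.Chars.isdigit c,
     r.2.2.1 || c == '-' || c == '_',
     r.2.2.2 || pvProfanity.any (fun x => x.toList.isPrefixOf (c :: t)))

def determine_reject_label_py_alt (record : List (String × String)) : String :=
  let w := PySem.Str.lower ((PySem.Dict.mk record).getD "normalized_word" "")
  let r := pvScan w.toList
  if r.2.2.2 then "profanity"
  else if 15 < r.1 then "too_long"
  else if r.1 < 3 then "too_short"
  else if r.2.1 then "contains_digits"
  else if r.2.2.1 then "contains_special_chars"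
  else if pvGeneric.contains w then "too_generic"
  else "not_saas_appropriate"

-- ===== PRECONDITION & SPEC =====
-- Pre_ excludes records without a 'normalized_word' key, on which A (and B) raise KeyError.
def Pre_determine_reject_label_py (record : List (String × String)) : Prop :=
  (PySem.Dict.mk record).contains "normalized_word" = true
instance (record : List (String × String)) : Decidable (Pre_determine_reject_label_py record) := by unfold Pre_determine_reject_label_py; infer_instance
def pvWitness_determine_reject_label_py : (List (String × String)) := [("normalized_word", "hello")]

def Spec_determine_reject_label_py (record : List (String × String)) (out : String) : Prop := out = determine_reject_label_py_alt record
instance (record : List (String × String)) (out : String) : Decidable (Spec_determine_reject_label_py record out) := by unfold Spec_determine_reject_label_py; infer_instance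

-- ===== CLAIM (what is proved, stated in full; the proofs are below) =====
def Claim_equal_determine_reject_label_py : Prop := ∀ (record : List (String × String)), Dom_determine_reject_label_py record → Pre_determine_reject_label_py record → Spec_determine_reject_label_py record (determine_reject_label_py record)

-- ===== LEMMAS AND PROOFS =====

theorem pvScan_len (cs : List Char) : (pvScan cs).1 = (cs.length : Int) := by
  induction cs with
  | nil => rfl
  | cons c t ih => simp [pvScan, ih]

theorem pvScan_digit (cs : List Char) :
    (pvScan cs).2.1 = cs.any PySem.Chars.isdigit := by
  induction cs with
  | nil => rfl
  | cons c t ih => simp [pvScan, ih, Bool.or_comm]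

theorem pvScan_special (cs : List Char) :
    (pvScan cs).2.2.1 = cs.any (fun c => c == '-' || c == '_') := by
  induction cs with
  | nil => rfl
  | cons c t ih => simp [pvScan, ih, Bool.or_comm, Bool.or_assoc, Bool.or_left_comm]

theorem pvScan_profane (cs : List Char) :
    (pvScan cs).2.2.2 = pvProfanity.any (fun x => PySem.Chars.isIn x.toList cs) := by
  induction cs with
  | nil => simp only [pvScan, pvProfanity]; decide
  | cons c t ih =>
    simp only [pvScan, ih]
    rw [Bool.eq_iff_iff]
    simp only [Bool.or_eq_true, List.any_eq_true, PySem.Chars.isIn_iff_infix,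
      List.infix_cons_iff, List.isPrefixOf_iff_prefix]
    aesop

theorem singleton_infix_iff (c : Char) (cs : List Char) :
    [c] <:+: cs ↔ c ∈ cs := by
  constructor
  · intro h; exact h.mem (by simp)
  · intro h
    obtain ⟨pre, suf, hsplit⟩ := List.append_of_mem h
    exact ⟨pre, suf, by rw [hsplit]; simp⟩

theorem lowerChar_idem (c : Char) :
    PySem.Chars.lowerChar (PySem.Chars.lowerChar c) = PySem.Chars.lowerChar c := by
  unfold PySem.Chars.lowerChar PySem.Chars.isupper
  split_ifs with h1 h2 <;> try rfl
  exfalso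
  simp only [Bool.and_eq_true, decide_eq_true_eq] at h1 h2
  have hA2 : 65 ≤ c.toNat := UInt32.le_iff_toNat_le.mp h1.1
  have hZ2 : c.toNat ≤ 90 := UInt32.le_iff_toNat_le.mp h1.2
  have hval : (c.toNat + 32).isValidChar := by constructor; omega
  have ht : (Char.ofNat (c.toNat + 32)).toNat = c.toNat + 32 := by
    rw [Char.toNat_ofNat, if_pos hval]
  have h90 : (Char.ofNat (c.toNat + 32)).toNat ≤ 90 := UInt32.le_iff_toNat_le.mp h2.2
  omega

theorem str_lower_idem (s : String) :
    PySem.Str.lower (PySem.Str.lower s) = PySem.Str.lower s := by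
  apply String.toList_injective
  simp only [PySem.Str.toList_lower, PySem.Chars.lower, List.map_map]
  exact List.map_congr_left (fun c _ => lowerChar_idem c)

theorem pv_special_eq (cs : List Char) :
    (PySem.Chars.isIn "-".toList cs || PySem.Chars.isIn "_".toList cs)
      = cs.any (fun c => c == '-' || c == '_') := by
  rw [Bool.eq_iff_iff]
  simp only [Bool.or_eq_true, PySem.Chars.isIn_iff_infix, List.any_eq_true, beq_iff_eq]
  have h1 : "-".toList = ['-'] := rfl
  have h2 : "_".toList = ['_'] := rfl
  rw [h1, h2, singleton_infix_iff, singleton_infix_iff]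
  aesop

-- ===== VERDICT (by name: the statement is the Claim_ definition above) =====
theorem determine_reject_label_py_spec : Claim_equal_determine_reject_label_py := by
  intro record _ _
  show determine_reject_label_py record = determine_reject_label_py_alt record
  simp only [determine_reject_label_py, determine_reject_label_py_alt,
    pvScan_len, pvScan_digit, pvScan_special, pvScan_profane, str_lower_idem,
    pv_special_eq, PySem.Str.len_eq, PySem.Str.isIn_eq, pvProfanity, pvGeneric]
  rfl
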